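-- pv_equiv track=rewrite | github.com/ikokkari/PythonProblems | labs109.py | word_height
-- ===== SOURCE A (Python) =====
-- from bisect import bisect_left
--
-- def __is_word(words, word):
--     idx = bisect_left(words, word)
--     return 0 <= idx < len(words) and words[idx] == word
--
-- def word_height(words, word):
--     if not __is_word(words, word):
--         return 0
--     best, n = 1, len(word)
--     for i in range(1, n):
--         left, right = word[:i], word[i:]
--         left_height = word_height(words, left)
--         if left_height > 0:
--             right_height = word_height(words, right)
--             if right_height > 0:
--                 best = max(best, 1 + max(left_height, right_height))
--     return best
-- ===== SOURCE B (Python) =====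
-- from bisect import bisect_left
--
-- def word_height(words, word):
--     memo = {}
--     def height(w):
--         v = memo.get(w)
--         if v is not None:
--             return v
--         idx = bisect_left(words, w)
--         if not (idx < len(words) and words[idx] == w):
--             memo[w] = 0
--             return 0
--         best = 1
--         for i in range(1, len(w)):
--             lh = height(w[:i])
--             if lh > 0:
--                 rh = height(w[i:])
--                 if rh > 0:
--                     best = max(best, 1 + max(lh, rh))
--         memo[w] = best
--         return best
--     return height(word)
-- ===== Notes on version B (the rewrite author's own statement) =====
-- stated objective: alternative
-- what changed: A's naive recursion re-solves the same substrings over and over (worst-case exponential); B threads a memo dict through the same recursion (top-down dynamic programming), solving each distinct substring once, which trades a small constant dict overhead on easy inputs for a polynomial bound on dense-dictionary inputs where A blows up.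
import Mathlib
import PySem

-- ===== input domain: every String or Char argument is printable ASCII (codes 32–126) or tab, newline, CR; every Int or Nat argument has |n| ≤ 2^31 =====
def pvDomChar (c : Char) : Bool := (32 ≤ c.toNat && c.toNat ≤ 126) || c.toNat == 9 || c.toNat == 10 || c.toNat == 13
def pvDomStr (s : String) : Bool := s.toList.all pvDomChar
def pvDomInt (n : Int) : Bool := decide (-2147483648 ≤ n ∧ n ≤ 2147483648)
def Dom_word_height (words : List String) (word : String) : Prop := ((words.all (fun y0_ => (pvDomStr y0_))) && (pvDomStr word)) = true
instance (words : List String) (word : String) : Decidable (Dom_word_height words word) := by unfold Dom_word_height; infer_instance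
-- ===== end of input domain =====

-- B memoizes the recursion over substrings (top-down DP with a dict keyed by substring), so each distinct substring is solved once; return values proved equal on all inputs.


-- ===== PORT A =====
-- __is_word(words, word): bisect_left, then '0 <= idx < len(words) and words[idx] == word'
def pvIsWord (words : List String) (word : String) : Bool :=
  let idx : Int := (PySem.List.bisectLeft words word : Nat)
  decide (0 ≤ idx ∧ idx < PySem.List.len words) && (PySem.List.pyGetD words idx "" == word)

-- A's recursion, with a fuel guard that only makes the recursion structural:
-- every recursive call is on a strictly shorter word, so fuel = len(word)+1 never runs out.
def pvWhA (words : List String) : Nat → String → Int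
  | 0, _ => 0
  | fuel+1, word =>
    if pvIsWord words word = false then 0
    else
      (PySem.List.pyRange 1 (PySem.Str.len word) 1).foldl (fun best i =>
        let left := PySem.Str.slice word none (some i)
        let right := PySem.Str.slice word (some i) none
        let lh := pvWhA words fuel left
        if lh > 0 then
          let rh := pvWhA words fuel right
          if rh > 0 then max best (1 + max lh rh) else best
        else best) 1

def word_height (words : List String) (word : String) : Int :=
  pvWhA words (word.toList.length + 1) word

-- ===== PORT B =====
-- B's local is_word(w): 'idx < len(words) and words[idx] == w'
def pvIsWordB (words : List String) (w : String) : Bool :=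
  let idx : Int := (PySem.List.bisectLeft words w : Nat)
  decide (idx < PySem.List.len words) && (PySem.List.pyGetD words idx "" == w)

-- B's height(w): the same recursion threading the memo dict; fuel as in A's port.
def pvHB (words : List String) : Nat → PySem.Dict String Int → String → PySem.Dict String Int × Int
  | 0, memo, _ => (memo, 0)
  | fuel+1, memo, w =>
    match memo.get? w with
    | some v => (memo, v)
    | none =>
      if pvIsWordB words w = false then (memo.insert w 0, 0)
      else
        let r := (PySem.List.pyRange 1 (PySem.Str.len w) 1).foldl (fun p i =>
          let q := pvHB words fuel p.1 (PySem.Str.slice w none (some i))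
          if q.2 > 0 then
            let t := pvHB words fuel q.1 (PySem.Str.slice w (some i) none)
            if t.2 > 0 then (t.1, max p.2 (1 + max q.2 t.2)) else (t.1, p.2)
          else (q.1, p.2)) (memo, 1)
        (r.1.insert w r.2, r.2)

def word_height_alt (words : List String) (word : String) : Int :=
  (pvHB words (word.toList.length + 1) PySem.Dict.empty word).2

-- ===== PRECONDITION & SPEC =====
def Spec_word_height (words : List String) (word : String) (out : Int) : Prop := out = word_height_alt words word
instance (words : List String) (word : String) (out : Int) : Decidable (Spec_word_height words word out) := by unfold Spec_word_height; infer_instance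

-- ===== CLAIM (what is proved, stated in full; the proofs are below) =====
def Claim_equal_word_height : Prop := ∀ (words : List String) (word : String), Dom_word_height words word → Spec_word_height words word (word_height words word)

-- ===== LEMMAS AND PROOFS =====

theorem pvIsWordB_eq (words : List String) (w : String) : pvIsWordB words w = pvIsWord words w := by
  simp [pvIsWord, pvIsWordB]

theorem pvSlice_to_len (w : String) (i : Int) (h1 : 1 ≤ i) (h2 : i < (w.toList.length : Int)) :
    (PySem.Str.slice w none (some i)).toList.length < w.toList.length := by
  rw [PySem.Str.toList_slice, PySem.Chars.slice_eq_listSlice, PySem.List.slice_to _ (by omega)]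
  simp only [List.length_take]
  omega

theorem pvSlice_from_len (w : String) (i : Int) (h1 : 1 ≤ i) (h2 : i < (w.toList.length : Int)) :
    (PySem.Str.slice w (some i) none).toList.length < w.toList.length := by
  rw [PySem.Str.toList_slice, PySem.Chars.slice_eq_listSlice, PySem.List.slice_from _ (by omega)]
  simp only [List.length_drop]
  omega

-- fuel irrelevance of A's recursion
theorem pvWhA_fuel (words : List String) :
    ∀ (f g : Nat) (w : String), w.toList.length < f → w.toList.length < g →
      pvWhA words f w = pvWhA words g w := by
  intro f
  induction f with
  | zero => intro g w hf hg; omega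
  | succ f ih =>
    intro g w hf hg
    cases g with
    | zero => omega
    | succ g =>
      simp only [pvWhA]
      by_cases hw : pvIsWord words w = false
      · simp [hw]
      · simp only [hw]
        apply PySem.List.foldl_congr_mem
        intro acc i hi
        rw [PySem.List.mem_pyRange_one, PySem.Str.len_eq] at hi
        obtain ⟨h1, h2⟩ := hi
        have hl := pvSlice_to_len w i h1 h2
        have hr := pvSlice_from_len w i h1 h2
        have e1 : pvWhA words f (PySem.Str.slice w none (some i))
                = pvWhA words g (PySem.Str.slice w none (some i)) := ih g _ (by omega) (by omega)
        have e2 : pvWhA words f (PySem.Str.slice w (some i) none)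
                = pvWhA words g (PySem.Str.slice w (some i) none) := ih g _ (by omega) (by omega)
        simp only [e1, e2]

-- one unfolding of A's recursion in terms of word_height itself
theorem word_height_unfold (words : List String) (w : String) :
    word_height words w =
      if pvIsWord words w = false then 0
      else
        (PySem.List.pyRange 1 (PySem.Str.len w) 1).foldl (fun best i =>
          let lh := word_height words (PySem.Str.slice w none (some i))
          if lh > 0 then
            let rh := word_height words (PySem.Str.slice w (some i) none)
            if rh > 0 then max best (1 + max lh rh) else best
          else best) 1 := by
  show pvWhA words (w.toList.length + 1) w = _
  simp only [pvWhA]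
  by_cases hw : pvIsWord words w = false
  · simp [hw]
  · simp only [hw]
    apply PySem.List.foldl_congr_mem
    intro acc i hi
    rw [PySem.List.mem_pyRange_one, PySem.Str.len_eq] at hi
    obtain ⟨h1, h2⟩ := hi
    have hl := pvSlice_to_len w i h1 h2
    have hr := pvSlice_from_len w i h1 h2
    have e1 : pvWhA words w.toList.length (PySem.Str.slice w none (some i))
            = word_height words (PySem.Str.slice w none (some i)) :=
      pvWhA_fuel words _ _ _ (by omega) (by omega)
    have e2 : pvWhA words w.toList.length (PySem.Str.slice w (some i) none)
            = word_height words (PySem.Str.slice w (some i) none) :=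
      pvWhA_fuel words _ _ _ (by omega) (by omega)
    simp only [e1, e2]

-- the memo invariant: every stored value is the true word_height
def pvMemoOK (words : List String) (memo : PySem.Dict String Int) : Prop :=
  ∀ s v, memo.get? s = some v → v = word_height words s

theorem pvHB_correct (words : List String) :
    ∀ (fuel : Nat) (memo : PySem.Dict String Int) (w : String),
      w.toList.length < fuel → pvMemoOK words memo →
      pvMemoOK words (pvHB words fuel memo w).1 ∧ (pvHB words fuel memo w).2 = word_height words w := by
  intro fuel
  induction fuel with
  | zero => intro memo w hf; omega
  | succ fuel ih =>
    intro memo w hf hP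
    cases hm : memo.get? w with
    | some v =>
      simp only [pvHB, hm]
      exact ⟨hP, hP w v hm⟩
    | none =>
      by_cases hw : pvIsWordB words w = false
      · simp only [pvHB, hm, hw, if_pos]
        have h0 : word_height words w = 0 := by
          rw [word_height_unfold, if_pos (by rw [← pvIsWordB_eq]; exact hw)]
        constructor
        · intro s v hs
          rw [PySem.Dict.get?_insert] at hs
          by_cases hsw : s = w
          · rw [if_pos hsw] at hs
            subst hsw
            rw [h0]
            exact (Option.some_inj.mp hs).symm
          · rw [if_neg hsw] at hs
            exact hP s v hs
        · simp [h0]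
      · simp only [pvHB, hm, hw, Bool.true_eq_false, reduceIte]
        have hw' : ¬ pvIsWord words w = false := by rw [← pvIsWordB_eq]; exact hw
        have key : ∀ (l : List Int), (∀ i ∈ l, 1 ≤ i ∧ i < (w.toList.length : Int)) →
            ∀ (memo : PySem.Dict String Int) (best : Int), pvMemoOK words memo →
            pvMemoOK words ((l.foldl (fun p i =>
              let q := pvHB words fuel p.1 (PySem.Str.slice w none (some i))
              if q.2 > 0 then
                let t := pvHB words fuel q.1 (PySem.Str.slice w (some i) none)
                if t.2 > 0 then (t.1, max p.2 (1 + max q.2 t.2)) else (t.1, p.2)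
              else (q.1, p.2)) (memo, best))).1 ∧
            ((l.foldl (fun p i =>
              let q := pvHB words fuel p.1 (PySem.Str.slice w none (some i))
              if q.2 > 0 then
                let t := pvHB words fuel q.1 (PySem.Str.slice w (some i) none)
                if t.2 > 0 then (t.1, max p.2 (1 + max q.2 t.2)) else (t.1, p.2)
              else (q.1, p.2)) (memo, best))).2 =
            l.foldl (fun best i =>
              let lh := word_height words (PySem.Str.slice w none (some i))
              if lh > 0 then
                let rh := word_height words (PySem.Str.slice w (some i) none)
                if rh > 0 then max best (1 + max lh rh) else best
              else best) best := by
          intro l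
          induction l with
          | nil => intro _ memo best hQ; exact ⟨hQ, rfl⟩
          | cons i l ihl =>
            intro hmem memo best hQ
            obtain ⟨hi1, hi2⟩ := hmem i (List.mem_cons_self ..)
            have hmem' : ∀ j ∈ l, 1 ≤ j ∧ j < (w.toList.length : Int) :=
              fun j hj => hmem j (List.mem_cons_of_mem _ hj)
            have hl := pvSlice_to_len w i hi1 hi2
            have hr := pvSlice_from_len w i hi1 hi2
            obtain ⟨hQ1, hq2⟩ := ih memo (PySem.Str.slice w none (some i)) (by omega) hQ
            simp only [List.foldl_cons]
            rw [← hq2]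
            by_cases hpos : (pvHB words fuel memo (PySem.Str.slice w none (some i))).2 > 0
            · obtain ⟨hT1, ht2⟩ := ih (pvHB words fuel memo (PySem.Str.slice w none (some i))).1
                (PySem.Str.slice w (some i) none) (by omega) hQ1
              rw [← ht2, if_pos hpos, if_pos hpos]
              by_cases hpos2 : (pvHB words fuel (pvHB words fuel memo
                  (PySem.Str.slice w none (some i))).1 (PySem.Str.slice w (some i) none)).2 > 0
              · rw [if_pos hpos2, if_pos hpos2]
                exact ihl hmem' _ _ hT1
              · rw [if_neg hpos2, if_neg hpos2]
                exact ihl hmem' _ _ hT1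
            · rw [if_neg hpos, if_neg hpos]
              exact ihl hmem' _ _ hQ1
        obtain ⟨hR1, hr2⟩ := key (PySem.List.pyRange 1 (PySem.Str.len w) 1)
          (by intro j hj; rw [PySem.List.mem_pyRange_one, PySem.Str.len_eq] at hj; omega)
          memo 1 hP
        have hwv : ((PySem.List.pyRange 1 (PySem.Str.len w) 1).foldl (fun p i =>
              let q := pvHB words fuel p.1 (PySem.Str.slice w none (some i))
              if q.2 > 0 then
                let t := pvHB words fuel q.1 (PySem.Str.slice w (some i) none)
                if t.2 > 0 then (t.1, max p.2 (1 + max q.2 t.2)) else (t.1, p.2)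
              else (q.1, p.2)) (memo, 1)).2 = word_height words w := by
          rw [hr2, word_height_unfold, if_neg hw']
        refine ⟨?_, hwv⟩
        intro s v hs
        rw [PySem.Dict.get?_insert] at hs
        by_cases hsw : s = w
        · rw [if_pos hsw] at hs
          subst hsw
          rw [← hwv]
          exact (Option.some_inj.mp hs).symm
        · rw [if_neg hsw] at hs
          exact hR1 s v hs

theorem word_height_spec' (words : List String) (word : String) :
    word_height words word = word_height_alt words word := by
  unfold word_height_alt
  have hP : pvMemoOK words PySem.Dict.empty := by
    intro s v hs
    rw [PySem.Dict.get?_empty] at hs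
    exact absurd hs (by simp)
  exact ((pvHB_correct words (word.toList.length + 1) PySem.Dict.empty word (by omega) hP).2).symm

-- ===== VERDICT (by name: the statement is the Claim_ definition above) =====
theorem word_height_spec : Claim_equal_word_height := by
  intro words word _
  unfold Spec_word_height
  exact word_height_spec' words word
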